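-- pv_equiv track=rewrite | github.com/rdoetjes/tuts | crypt/auto_resolve.py | pick_printable_candidate
-- ===== SOURCE A (Python) =====
-- from typing import Dict, List, Optional
--
-- def pick_printable_candidate(cands: List[int]) -> Optional[int]:
--     """
--     Prefer printable ASCII (32..126). If multiple printable, prefer the first
--     printable that looks alphanumeric or typical punctuation. Otherwise return
--     the first printable. If no printable candidate, return None.
--     """
--     printable = [c for c in cands if 32 <= c <= 126]
--     if not printable:
--         return None
--     # Prefer alnum/punctuation that matches typical key chars
--     for c in printable:
--         ch = chr(c)
--         if ch.isalnum() or ch in "-_./:@&^*%$#()[]{}!+,":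
--             return c
--     # else return first printable
--     return printable[0]
-- ===== SOURCE B (Python) =====
-- def pick_printable_candidate(cands):
--     first_printable = None
--     for c in cands:
--         if not (32 <= c <= 126):
--             continue
--         ch = chr(c)
--         if ch.isalnum() or ch in "-_./:@&^*%$#()[]{}!+,":
--             return c
--         if first_printable is None:
--             first_printable = c
--     return first_printable
-- ===== Notes on version B (the rewrite author's own statement) =====
-- stated objective: simpler
-- what changed: B replaces A's two passes (build the filtered printable list, then rescan it) by a single pass over cands with one first_printable accumulator and an early return, never materialising the intermediate list.
import Mathlib
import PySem

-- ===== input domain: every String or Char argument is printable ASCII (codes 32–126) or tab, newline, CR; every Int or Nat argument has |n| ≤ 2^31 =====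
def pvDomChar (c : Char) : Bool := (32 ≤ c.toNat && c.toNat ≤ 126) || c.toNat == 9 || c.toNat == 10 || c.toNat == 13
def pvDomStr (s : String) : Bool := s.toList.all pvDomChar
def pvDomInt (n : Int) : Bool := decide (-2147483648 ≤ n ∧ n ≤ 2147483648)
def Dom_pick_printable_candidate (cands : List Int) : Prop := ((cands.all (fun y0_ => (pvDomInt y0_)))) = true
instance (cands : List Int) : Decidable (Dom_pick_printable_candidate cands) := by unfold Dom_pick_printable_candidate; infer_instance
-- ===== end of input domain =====

-- B: one pass with a first_printable accumulator and early return, instead of A's filtered list plus rescan; same return value.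
-- ===== PORT A =====
-- shared character test: chr(c).isalnum() or chr(c) in "-_./:@&^*%$#()[]{}!+," (used verbatim by both Pythons)
def pvIsKeyChar (c : Int) : Bool :=
  let ch := Char.ofNat c.toNat
  PySem.Chars.isalnum ch || ("-_./:@&^*%$#()[]{}!+,".toList.contains ch)

-- the 'for c in printable: … return c' loop of A
def pickLoopA : List Int → Option Int
  | [] => none
  | c :: t => if pvIsKeyChar c then some c else pickLoopA t

def pick_printable_candidate (cands : List Int) : Option Int :=
  let printable := cands.filter (fun c => decide (32 ≤ c ∧ c ≤ 126))
  if printable = [] then none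
  else
    match pickLoopA printable with
    | some c => some c
    | none => printable.head?   -- printable[0]; list is nonempty here

-- ===== PORT B =====
-- B's single loop carrying the first_printable accumulator
def pickLoopB : List Int → Option Int → Option Int
  | [], acc => acc
  | c :: t, acc =>
    if 32 ≤ c ∧ c ≤ 126 then
      if pvIsKeyChar c then some c
      else pickLoopB t (if acc.isNone then some c else acc)
    else pickLoopB t acc

def pick_printable_candidate_alt (cands : List Int) : Option Int :=
  pickLoopB cands none

-- ===== PRECONDITION & SPEC =====
def Spec_pick_printable_candidate (cands : List Int) (out : Option Int) : Prop := out = pick_printable_candidate_alt cands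
instance (cands : List Int) (out : Option Int) : Decidable (Spec_pick_printable_candidate cands out) := by unfold Spec_pick_printable_candidate; infer_instance

-- ===== CLAIM (what is proved, stated in full; the proofs are below) =====
def Claim_equal_pick_printable_candidate : Prop := ∀ (cands : List Int), Dom_pick_printable_candidate cands → Spec_pick_printable_candidate cands (pick_printable_candidate cands)

-- ===== LEMMAS AND PROOFS =====

-- ===== LEMMAS =====
lemma pickLoopB_eq (cands : List Int) : ∀ (acc : Option Int),
    pickLoopB cands acc =
      (match pickLoopA (cands.filter (fun c => decide (32 ≤ c ∧ c ≤ 126))) with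
       | some c => some c
       | none =>
         match acc with
         | some a => some a
         | none => (cands.filter (fun c => decide (32 ≤ c ∧ c ≤ 126))).head?) := by
  induction cands with
  | nil => intro acc; cases acc <;> simp [pickLoopB, pickLoopA]
  | cons c t ih =>
    intro acc
    by_cases h : 32 ≤ c ∧ c ≤ 126
    · by_cases hk : pvIsKeyChar c = true
      · simp [pickLoopB, h, hk, pickLoopA]
      · cases acc <;> simp [pickLoopB, h, hk, pickLoopA, ih]
    · simp [pickLoopB, h, ih]

-- ===== VERDICT (by name: the statement is the Claim_ definition above) =====
theorem pick_printable_candidate_spec : Claim_equal_pick_printable_candidate := by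
  intro cands _
  unfold Spec_pick_printable_candidate pick_printable_candidate pick_printable_candidate_alt
  rw [pickLoopB_eq]
  by_cases h : cands.filter (fun c => decide (32 ≤ c ∧ c ≤ 126)) = []
  · rw [if_pos h, h]; rfl
  · rw [if_neg h]
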